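-- pv_equiv track=rewrite | github.com/Tanat04/basic-python-programming | Basic python/Assignment 11/ex11_8_1.py | KeepTwoDuplicate
-- ===== SOURCE A (Python) =====
-- def KeepTwoDuplicate(numlist):
--     seen={}
--     lt=[]
--     for num in numlist:
--         if num not in seen:
--             seen[num] = 1
--             lt.append(num)
--         else:
--             if seen[num] == 1:
--                 seen[num] += 1
--                 lt.append(num)
--     return lt
-- ===== SOURCE B (Python) =====
-- def KeepTwoDuplicate(numlist):
--     # Prune-ahead strategy: emit the head, then rewrite the remaining work list so
--     # that at most one further copy of the emitted value survives (keep its first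
--     # later occurrence, drop all others).  No counters are kept at all.
--     out = []
--     work = list(numlist)
--     while work:
--         x = work[0]
--         rest = work[1:]
--         out.append(x)
--         if x in rest:
--             i = rest.index(x)
--             rest = rest[:i + 1] + [y for y in rest[i + 1:] if y != x]
--         work = rest
--     return out
-- ===== Notes on version B (the rewrite author's own statement) =====
-- stated objective: alternative
-- what changed: Replaces the counting dict with a prune-ahead rewriting loop: after emitting the head of the work list it rewrites the remaining work so at most one further copy of that value survives (first later occurrence kept, the rest filtered out), so no per-value counters exist at all.
import Mathlib
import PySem

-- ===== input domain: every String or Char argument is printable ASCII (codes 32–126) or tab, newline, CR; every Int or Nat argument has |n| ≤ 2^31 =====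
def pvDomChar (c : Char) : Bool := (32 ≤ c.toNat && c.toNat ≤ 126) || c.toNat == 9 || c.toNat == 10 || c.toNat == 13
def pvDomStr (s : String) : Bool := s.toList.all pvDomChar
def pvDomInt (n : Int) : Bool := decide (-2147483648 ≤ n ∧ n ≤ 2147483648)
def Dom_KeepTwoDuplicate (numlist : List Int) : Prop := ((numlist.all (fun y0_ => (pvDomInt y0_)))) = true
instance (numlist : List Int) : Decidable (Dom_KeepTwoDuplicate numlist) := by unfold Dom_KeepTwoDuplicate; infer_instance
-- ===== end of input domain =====

-- B replaces A's counting dict with a prune-ahead rewriting loop: after emitting the head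
-- of the work list it rewrites the rest so at most one further copy of that value survives
-- (objective: alternative; neither mutates its argument).

-- ===== PORT A =====
def KeepTwoDuplicate (numlist : List Int) : List Int :=
  (numlist.foldl
    (fun (st : PySem.Dict Int Int × List Int) num =>
      let seen := st.1
      let lt := st.2
      if ¬ (seen.contains num) then
        (seen.insert num 1, lt ++ [num])
      else
        if seen.getD num 0 = 1 then
          (seen.insert num (seen.getD num 0 + 1), lt ++ [num])
        else
          (seen, lt))
    (PySem.Dict.empty, [])).2

-- ===== PORT B =====
-- while work: x = work[0]; rest = work[1:]; out.append(x);
--   if x in rest: i = rest.index(x); rest = rest[:i+1] + [y for y in rest[i+1:] if y != x]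
--   work = rest
-- (the recursion below is that while loop: one iteration per emitted element)
def KeepTwoDuplicate_alt (numlist : List Int) : List Int :=
  match numlist with
  | [] => []
  | x :: rest =>
    let rest' :=
      if x ∈ rest then
        let i := ((PySem.List.index? rest x).getD 0 : Nat)   -- rest.index(x); x ∈ rest so it never raises
        PySem.List.slice rest none (some ((i : Int) + 1)) ++
          (PySem.List.slice rest (some ((i : Int) + 1)) none).filter (fun y => decide (y ≠ x))
      else rest
    x :: KeepTwoDuplicate_alt rest'
termination_by numlist.length
decreasing_by
  simp only [List.length_cons]
  split
  · have h1 : PySem.List.slice rest none (some (((PySem.List.index? rest x).getD 0 : Nat) + 1 : Int))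
        = rest.take ((PySem.List.index? rest x).getD 0 + 1) := by
      rw [show (((PySem.List.index? rest x).getD 0 : Nat) + 1 : Int)
            = (((PySem.List.index? rest x).getD 0 + 1 : Nat) : Int) by push_cast; ring]
      exact PySem.List.slice_to_natCast rest _
    have h2 : PySem.List.slice rest (some (((PySem.List.index? rest x).getD 0 : Nat) + 1 : Int)) none
        = rest.drop ((PySem.List.index? rest x).getD 0 + 1) := by
      rw [show (((PySem.List.index? rest x).getD 0 : Nat) + 1 : Int)
            = (((PySem.List.index? rest x).getD 0 + 1 : Nat) : Int) by push_cast; ring]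
      exact PySem.List.slice_from_natCast rest _
    rw [h1, h2]
    have := List.length_filter_le (fun y => decide (y ≠ x)) (rest.drop ((PySem.List.index? rest x).getD 0 + 1))
    simp only [List.length_append, List.length_take, List.length_drop] at *
    omega
  · omega

-- ===== PRECONDITION & SPEC =====
def Spec_KeepTwoDuplicate (numlist : List Int) (out : List Int) : Prop := out = KeepTwoDuplicate_alt numlist
instance (numlist : List Int) (out : List Int) : Decidable (Spec_KeepTwoDuplicate numlist out) := by unfold Spec_KeepTwoDuplicate; infer_instance

-- ===== CLAIM (what is proved, stated in full; the proofs are below) =====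
def Claim_equal_KeepTwoDuplicate : Prop := ∀ (numlist : List Int), Dom_KeepTwoDuplicate numlist → Spec_KeepTwoDuplicate numlist (KeepTwoDuplicate numlist)

-- ===== LEMMAS AND PROOFS =====

-- Canonical middleman: keep an element iff its running count is still below 2.
def gAux (c : Int → Nat) : List Int → List Int
  | [] => []
  | n :: r => if c n < 2 then n :: gAux (fun y => if y = n then c y + 1 else c y) r else gAux c r

-- A's dict loop equals gAux: the dict stores exactly the (capped) running count.
theorem A_eq_gAux (l : List Int) (seen : PySem.Dict Int Int) (lt : List Int) (c : Int → Nat)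
    (h : ∀ x : Int, seen.get? x = if c x = 0 then none else some ((c x : Int))) :
    (l.foldl
      (fun (st : PySem.Dict Int Int × List Int) num =>
        let seen := st.1
        let lt := st.2
        if ¬ (seen.contains num) then
          (seen.insert num 1, lt ++ [num])
        else
          if seen.getD num 0 = 1 then
            (seen.insert num (seen.getD num 0 + 1), lt ++ [num])
          else
            (seen, lt))
      (seen, lt)).2 = lt ++ gAux c l := by
  induction l generalizing seen lt c with
  | nil => simp [gAux]
  | cons num rest ih =>
    simp only [List.foldl_cons]
    have hc : seen.contains num = (seen.get? num).isSome :=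
      PySem.Dict.contains_eq_isSome_get? seen num
    by_cases h0 : c num = 0
    · -- not seen yet: both sides emit num
      have hget : seen.get? num = none := by rw [h num]; simp [h0]
      have hstep : (if ¬ seen.contains num then
          (seen.insert num 1, lt ++ [num])
        else
          if seen.getD num 0 = 1 then
            (seen.insert num (seen.getD num 0 + 1), lt ++ [num])
          else (seen, lt)) = (seen.insert num 1, lt ++ [num]) := by
        simp [hc, hget]
      rw [hstep]
      have hg : gAux c (num :: rest)
          = num :: gAux (fun y => if y = num then c y + 1 else c y) rest := by
        simp [gAux, h0]
      rw [hg]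
      rw [ih _ _ (fun y => if y = num then c y + 1 else c y) ?_]
      · simp
      · intro x
        rw [PySem.Dict.get?_insert]
        by_cases hx : x = num
        · subst hx; simp [h0]
        · simp [hx, h x]
    · by_cases h1 : c num = 1
      · -- seen once: both sides emit num again
        have hget : seen.get? num = some 1 := by rw [h num, h1]; simp
        have hgd : seen.getD num 0 = 1 := by rw [PySem.Dict.getD_eq_get?_getD, hget]; rfl
        have hstep : (if ¬ seen.contains num then
            (seen.insert num 1, lt ++ [num])
          else
            if seen.getD num 0 = 1 then
              (seen.insert num (seen.getD num 0 + 1), lt ++ [num])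
            else (seen, lt)) = (seen.insert num 2, lt ++ [num]) := by
          simp [hc, hget, hgd]
        rw [hstep]
        have hg : gAux c (num :: rest)
            = num :: gAux (fun y => if y = num then c y + 1 else c y) rest := by
          simp [gAux, h1]
        rw [hg]
        rw [ih _ _ (fun y => if y = num then c y + 1 else c y) ?_]
        · simp
        · intro x
          rw [PySem.Dict.get?_insert]
          by_cases hx : x = num
          · subst hx; simp [h1]
          · simp [hx, h x]
      · -- already emitted twice: both sides skip
        have h2 : 2 ≤ c num := by omega
        have hget : seen.get? num = some ((c num : Int)) := by rw [h num]; simp [h0]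
        have hgd : seen.getD num 0 = ((c num : Int)) := by
          rw [PySem.Dict.getD_eq_get?_getD, hget]; rfl
        have hne : seen.getD num 0 ≠ 1 := by rw [hgd]; exact_mod_cast by omega
        have hstep : (if ¬ seen.contains num then
            (seen.insert num 1, lt ++ [num])
          else
            if seen.getD num 0 = 1 then
              (seen.insert num (seen.getD num 0 + 1), lt ++ [num])
            else (seen, lt)) = (seen, lt) := by
          simp [hc, hget, hne]
        rw [hstep]
        have hg : gAux c (num :: rest) = gAux c rest := by
          simp [gAux]; omega
        rw [hg]
        exact ih seen lt c h

-- Filtering the later copies of x out is invisible to gAux once c x ≥ 2.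
theorem gAux_filter (x : Int) (v : List Int) (c : Int → Nat) (hc : 2 ≤ c x) :
    gAux c v = gAux c (v.filter (fun y => decide (y ≠ x))) := by
  induction v generalizing c with
  | nil => rfl
  | cons y v' ih =>
    by_cases hy : y = x
    · subst hy
      have h2 : ¬ (c y < 2) := by omega
      simp only [List.filter_cons, decide_not, ne_eq, decide_true, Bool.not_true]
      simp [gAux, h2, ih c hc]
    · simp only [List.filter_cons, if_pos (by simp [hy] : (decide (y ≠ x)) = true)]
      simp only [gAux]
      split_ifs with h2
      · have hx' : (fun z => if z = y then c z + 1 else c z) x = c x := by simp [Ne.symm hy]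
        rw [ih _ (le_of_le_of_eq hc hx'.symm)]
      · exact ih c hc

-- gAux over a common x-free prefix: a tail equality parametric in c x lifts over the prefix.
theorem gAux_prefix_congr (x : Int) (u : List Int) (s t : List Int) (c : Int → Nat)
    (hu : x ∉ u) (hst : ∀ c' : Int → Nat, c' x = c x → gAux c' s = gAux c' t) :
    gAux c (u ++ s) = gAux c (u ++ t) := by
  induction u generalizing c with
  | nil => exact hst c rfl
  | cons a u' ih =>
    have ha : a ≠ x := fun e => hu (e ▸ List.mem_cons_self)
    have hu' : x ∉ u' := fun hxu => hu (List.mem_cons_of_mem a hxu)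
    simp only [List.cons_append, gAux]
    split_ifs with h2
    · have hbx : (fun z => if z = a then c z + 1 else c z) x = c x := by simp [Ne.symm ha]
      rw [ih _ hu' (fun c' h' => hst c' (h'.trans hbx))]
    · exact ih c hu' hst

-- Unfolding B's loop: the empty work list.
theorem B_nil : KeepTwoDuplicate_alt [] = [] := by
  rw [KeepTwoDuplicate_alt]

-- Unfolding B's loop when the emitted head does not reoccur: no pruning happens.
theorem B_cons_not_mem (x : Int) (rest : List Int) (hx : x ∉ rest) :
    KeepTwoDuplicate_alt (x :: rest) = x :: KeepTwoDuplicate_alt rest := by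
  rw [KeepTwoDuplicate_alt]
  simp [hx]

-- Unfolding B's loop at a reoccurring head: the first later copy stays, the rest are filtered.
theorem B_cons_mem (x : Int) (u v : List Int) (hxu : x ∉ u) :
    KeepTwoDuplicate_alt (x :: (u ++ x :: v))
      = x :: KeepTwoDuplicate_alt (u ++ x :: v.filter (fun y => decide (y ≠ x))) := by
  rw [KeepTwoDuplicate_alt]
  have hmem : x ∈ u ++ x :: v := by simp
  have hidx : PySem.List.index? (u ++ x :: v) x = some u.length := by
    rw [PySem.List.index?_eq_some_iff]; exact ⟨u, v, rfl, rfl, hxu⟩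
  simp only [hmem, if_pos, hidx, Option.getD_some]
  rw [show ((u.length : Nat) : Int) + 1 = ((u.length + 1 : Nat) : Int) by push_cast; ring]
  rw [PySem.List.slice_to_natCast, PySem.List.slice_from_natCast]
  simp [List.take_append, List.drop_append, List.take_of_length_le, List.drop_eq_nil_of_le]

-- B's prune-ahead loop equals gAux under the invariant: every value still in the work
-- list has count 0, or count 1 and exactly one remaining occurrence.
theorem B_eq_gAux_aux (n : Nat) : ∀ (l : List Int) (c : Int → Nat), l.length ≤ n →
    (∀ x : Int, x ∈ l → c x = 0 ∨ (c x = 1 ∧ l.count x = 1)) →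
    KeepTwoDuplicate_alt l = gAux c l := by
  induction n with
  | zero =>
    intro l c hl _
    rw [List.eq_nil_of_length_eq_zero (Nat.le_zero.mp hl), B_nil]; rfl
  | succ n ih =>
    intro l c hl hinv
    match l with
    | [] => rw [B_nil]; rfl
    | x :: rest =>
      have hx := hinv x List.mem_cons_self
      have hcx2 : c x < 2 := by rcases hx with h | ⟨h, _⟩ <;> omega
      have hg : gAux c (x :: rest)
          = x :: gAux (fun y => if y = x then c y + 1 else c y) rest := by
        simp [gAux, hcx2]
      have hlrest : rest.length ≤ n := by
        have := hl; simp only [List.length_cons] at this; omega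
      -- shared invariant transfer when x does not reoccur in the work list
      have invrest : x ∉ rest →
          ∀ y : Int, y ∈ rest →
            (fun y => if y = x then c y + 1 else c y) y = 0 ∨
            ((fun y => if y = x then c y + 1 else c y) y = 1 ∧ rest.count y = 1) := by
        intro hxr y hy
        have hyx : y ≠ x := fun e => hxr (e ▸ hy)
        simp only [if_neg hyx]
        rcases hinv y (List.mem_cons_of_mem x hy) with h0 | ⟨h1, hcnty⟩
        · exact Or.inl h0
        · refine Or.inr ⟨h1, ?_⟩
          simpa [List.count_cons, Ne.symm hyx] using hcnty
      rcases hx with hx0 | ⟨hx1, hcnt⟩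
      · by_cases hxr : x ∈ rest
        · -- x reoccurs: decompose at its first later occurrence
          obtain ⟨i, hi⟩ : ∃ i, PySem.List.index? rest x = some i := by
            have := (PySem.List.index?_isSome_iff rest x).mpr hxr
            exact Option.isSome_iff_exists.mp this
          obtain ⟨u, v, hrest, hlen, hxu⟩ := (PySem.List.index?_eq_some_iff rest x i).mp hi
          subst hrest
          rw [B_cons_mem x u v hxu, hg]
          congr 1
          have hfilter : gAux (fun y => if y = x then c y + 1 else c y) (u ++ x :: v)
              = gAux (fun y => if y = x then c y + 1 else c y)
                  (u ++ x :: v.filter (fun y => decide (y ≠ x))) := by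
            apply gAux_prefix_congr x u _ _ _ hxu
            intro c'' hcx
            have hc''x : c'' x = 1 := by rw [hcx]; simp [hx0]
            simp only [gAux, if_pos (show c'' x < 2 by omega)]
            congr 1
            exact gAux_filter x v _ (by simp [hc''x])
          rw [hfilter]
          apply ih _ _ ?_ ?_
          · -- length: the pruned work list is no longer than the old one
            have hfle : (v.filter (fun y => decide (y ≠ x))).length ≤ v.length :=
              List.length_filter_le _ _
            simp only [List.length_append, List.length_cons] at hlrest ⊢
            omega
          · -- invariant for the pruned work list
            intro y hy
            by_cases hyx : y = x
            · subst hyx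
              refine Or.inr ⟨by simp [hx0], ?_⟩
              have hcu : u.count y = 0 := List.count_eq_zero.mpr hxu
              simp [List.count_append, hcu, List.count_eq_zero]
            · simp only [if_neg hyx]
              have hyv : y ∈ u ++ x :: v := by
                rcases List.mem_append.mp hy with h | h
                · exact List.mem_append.mpr (Or.inl h)
                · rcases List.mem_cons.mp h with h' | h'
                  · exact absurd h' hyx
                  · exact List.mem_append.mpr (Or.inr (List.mem_cons_of_mem x
                      (List.mem_of_mem_filter h')))
              rcases hinv y (List.mem_cons_of_mem x hyv) with h0 | ⟨h1, hcnty⟩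
              · exact Or.inl h0
              · refine Or.inr ⟨h1, ?_⟩
                have hfc : (List.filter (fun z => !decide (z = x)) v).count y = v.count y := by
                  rw [List.count_filter]; simp [hyx]
                have h2 : u.count y + v.count y = 1 := by
                  have h3 := hcnty
                  simp [List.count_append, Ne.symm hyx] at h3
                  omega
                simp [List.count_append, Ne.symm hyx, hfc]
                omega
        · -- x never reoccurs: nothing to prune
          rw [B_cons_not_mem x rest hxr, hg]
          exact congrArg (x :: ·) (ih rest _ hlrest (invrest hxr))
      · -- c x = 1: the invariant forces this to be the last occurrence of x
        have hxr : x ∉ rest := by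
          have : rest.count x = 0 := by simpa [List.count_cons] using hcnt
          exact List.count_eq_zero.mp this
        rw [B_cons_not_mem x rest hxr, hg]
        exact congrArg (x :: ·) (ih rest _ hlrest (invrest hxr))

theorem B_eq_gAux (l : List Int) (c : Int → Nat)
    (h : ∀ x : Int, x ∈ l → c x = 0 ∨ (c x = 1 ∧ l.count x = 1)) :
    KeepTwoDuplicate_alt l = gAux c l :=
  B_eq_gAux_aux l.length l c le_rfl h

-- ===== VERDICT (by name: the statement is the Claim_ definition above) =====
theorem KeepTwoDuplicate_spec : Claim_equal_KeepTwoDuplicate := by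
  intro numlist _
  unfold Spec_KeepTwoDuplicate
  have hA : KeepTwoDuplicate numlist = gAux (fun _ => 0) numlist := by
    unfold KeepTwoDuplicate
    exact A_eq_gAux numlist PySem.Dict.empty [] (fun _ => 0)
      (fun x => by simp [PySem.Dict.get?_empty])
  have hB : KeepTwoDuplicate_alt numlist = gAux (fun _ => 0) numlist :=
    B_eq_gAux numlist (fun _ => 0) (fun x _ => Or.inl rfl)
  rw [hA, hB]
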